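-- pv_equiv track=rewrite | github.com/MrBrantCode/unitest_baseline | mut_generate/mist_train_cf/cf_1921/solution.py | filter_divisible_by_3_and_7
-- ===== SOURCE A (Python) =====
-- def filter_divisible_by_3_and_7(arr):
--     # Step 1: Find all elements divisible by both 3 and 7
--     divisible_elements = set()
--     for num in arr:
--         if num % 3 == 0 and num % 7 == 0:
--             divisible_elements.add(num)
--
--     # Step 2: Convert set back to list and sort the array
--     result = list(divisible_elements)
--     for i in range(len(result)):
--         for j in range(len(result) - 1):
--             if result[j] > result[j + 1]:
--                 result[j], result[j + 1] = result[j + 1], result[j]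
--     return result
-- ===== SOURCE B (Python) =====
-- def filter_divisible_by_3_and_7(arr):
--     # filter (keeping duplicates), sort, then drop now-adjacent duplicates in one pass
--     picked = [num for num in arr if num % 3 == 0 and num % 7 == 0]
--     picked = sorted(picked)
--     result = []
--     for num in picked:
--         if not result or num != result[-1]:
--             result.append(num)
--     return result
-- ===== Notes on version B (the rewrite author's own statement) =====
-- stated objective: simpler
-- what changed: Replaces A's hash-set dedup followed by a hand-written O(k^2) bubble sort with filter-keeping-duplicates, a single sorted() call, and one linear adjacent-duplicate pass (no set is ever built; dedup relies on sorting making equal elements adjacent).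
import Mathlib
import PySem

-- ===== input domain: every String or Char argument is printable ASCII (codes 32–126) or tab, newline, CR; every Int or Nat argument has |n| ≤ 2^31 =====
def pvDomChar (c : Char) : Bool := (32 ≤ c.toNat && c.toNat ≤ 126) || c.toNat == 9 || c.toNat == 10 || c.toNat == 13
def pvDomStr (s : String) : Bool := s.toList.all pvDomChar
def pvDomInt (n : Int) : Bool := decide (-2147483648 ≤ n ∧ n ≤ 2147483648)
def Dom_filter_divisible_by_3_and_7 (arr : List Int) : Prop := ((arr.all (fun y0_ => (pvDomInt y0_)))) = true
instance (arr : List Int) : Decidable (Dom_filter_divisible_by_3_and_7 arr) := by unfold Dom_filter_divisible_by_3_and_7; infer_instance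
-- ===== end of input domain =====

-- ===== PORT A =====
-- A: collect the multiples of 21 into a set, then bubble-sort the set's elements.
-- B (below): filter keeping duplicates, one sorted() call, then a linear adjacent-dedup pass.
-- This file proves the two return the same list on every input.

-- inner j-loop of A: the adjacent compare-and-swap pass over `result`, rendered structurally
def bubblePass : List Int → List Int
  | [] => []
  | [x] => [x]
  | x :: y :: t => if x > y then y :: bubblePass (x :: t) else x :: bubblePass (y :: t)

def filter_divisible_by_3_and_7 (arr : List Int) : List Int :=
  let divisible_elements : PySem.Set Int :=
    arr.foldl (fun ds num =>
      if PySem.Int.mod num 3 == 0 && PySem.Int.mod num 7 == 0 then PySem.Set.add ds num else ds)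
      PySem.Set.empty
  -- for i in range(len(result)): one full bubble pass per iteration
  (PySem.List.pyRange 0 (divisible_elements.length : Int) 1).foldl
    (fun r _ => bubblePass r) divisible_elements

-- ===== PORT B =====
def filter_divisible_by_3_and_7_alt (arr : List Int) : List Int :=
  let picked := arr.filter (fun num => PySem.Int.mod num 3 == 0 && PySem.Int.mod num 7 == 0)
  let spicked := PySem.List.sorted picked (fun x => x) false
  spicked.foldl
    (fun result num => if result = [] ∨ result.getLast? ≠ some num then result ++ [num] else result)
    []

-- ===== PRECONDITION & SPEC =====
def Spec_filter_divisible_by_3_and_7 (arr : List Int) (out : List Int) : Prop := out = filter_divisible_by_3_and_7_alt arr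
instance (arr : List Int) (out : List Int) : Decidable (Spec_filter_divisible_by_3_and_7 arr out) := by unfold Spec_filter_divisible_by_3_and_7; infer_instance

-- ===== CLAIM (what is proved, stated in full; the proofs are below) =====
def Claim_equal_filter_divisible_by_3_and_7 : Prop := ∀ (arr : List Int), Dom_filter_divisible_by_3_and_7 arr → Spec_filter_divisible_by_3_and_7 arr (filter_divisible_by_3_and_7 arr)

-- ===== LEMMAS AND PROOFS =====

theorem foldl_const_eq_iterate {α β : Type} (f : α → α) :
    ∀ (l : List β) (s : α), l.foldl (fun r _ => f r) s = f^[l.length] s := by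
  intro l
  induction l with
  | nil => intro s; rfl
  | cons x t ih => intro s; simp [List.foldl, ih, Function.iterate_succ_apply]

theorem bubblePass_sorted_fix : ∀ (l : List Int), l.Pairwise (· ≤ ·) → bubblePass l = l := by
  intro l
  induction l with
  | nil => intro _; simp [bubblePass]
  | cons x t ih =>
    intro h
    cases t with
    | nil => simp [bubblePass]
    | cons y u =>
      have hxy : x ≤ y := (List.pairwise_cons.mp h).1 y (by simp)
      have ht : (y :: u).Pairwise (· ≤ ·) := (List.pairwise_cons.mp h).2
      simp [bubblePass, not_lt.mpr hxy, ih ht]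

-- one bubble pass over a ++ b, b sorted and dominating a: the max of a lands in front of b
theorem bubblePass_step :
    ∀ (rest : List Int) (x : Int) (b : List Int),
      b.Pairwise (· ≤ ·) → (∀ u ∈ x :: rest, ∀ y ∈ b, u ≤ y) →
      ∃ a' m, bubblePass (x :: rest ++ b) = a' ++ m :: b ∧
        (a' ++ [m]).Perm (x :: rest) ∧ (∀ u ∈ a', u ≤ m) := by
  intro rest
  induction rest with
  | nil =>
    intro x b hb hdom
    cases b with
    | nil => exact ⟨[], x, by simp [bubblePass], by simp, by simp⟩
    | cons y u =>
      have hxy : x ≤ y := hdom x (by simp) y (by simp)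
      refine ⟨[], x, ?_, by simp, by simp⟩
      simp [bubblePass, not_lt.mpr hxy, bubblePass_sorted_fix _ hb]
  | cons z rest' ih =>
    intro x b hb hdom
    by_cases hgt : x > z
    · obtain ⟨a', m, heq, hperm, hle⟩ := ih x b hb (by
        intro u hu y hy
        apply hdom u _ y hy
        simp at hu ⊢; tauto)
      refine ⟨z :: a', m, ?_, ?_, ?_⟩
      · have hstep : bubblePass (x :: z :: rest' ++ b) = z :: bubblePass (x :: rest' ++ b) := by
          simp [bubblePass, hgt]
        simp only [List.cons_append] at hstep heq ⊢
        rw [hstep, heq]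
      · have h1 : (z :: (a' ++ [m])).Perm (z :: x :: rest') := hperm.cons z
        have h2 : (z :: x :: rest').Perm (x :: z :: rest') := List.Perm.swap x z rest'
        simpa using h1.trans h2
      · intro u hu
        rcases List.mem_cons.mp hu with h | h
        · subst h
          have hx : x ∈ a' ++ [m] := hperm.mem_iff.mpr (by simp)
          rcases List.mem_append.mp hx with h2 | h2
          · exact le_of_lt (lt_of_lt_of_le hgt (hle x h2))
          · simp at h2; exact le_of_lt (h2 ▸ hgt)
        · exact hle u h
    · obtain ⟨a', m, heq, hperm, hle⟩ := ih z b hb (by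
        intro u hu y hy
        apply hdom u _ y hy
        simp at hu ⊢; tauto)
      refine ⟨x :: a', m, ?_, ?_, ?_⟩
      · have hstep : bubblePass (x :: z :: rest' ++ b) = x :: bubblePass (z :: rest' ++ b) := by
          simp [bubblePass, hgt]
        simp only [List.cons_append] at hstep heq ⊢
        rw [hstep, heq]
      · simpa using hperm.cons x
      · intro u hu
        rcases List.mem_cons.mp hu with h | h
        · subst h
          have hz : z ∈ a' ++ [m] := hperm.mem_iff.mpr (by simp)
          have hxz : u ≤ z := not_lt.mp hgt
          rcases List.mem_append.mp hz with h2 | h2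
          · exact le_trans hxz (hle z h2)
          · simp at h2; exact h2 ▸ hxz
        · exact hle u h

-- the bubble invariant: after k passes the list splits as a ++ b with b a sorted,
-- dominating suffix of length ≥ k (or a already empty)
theorem bubble_iterate_invariant (s : List Int) :
    ∀ k : Nat, ∃ a b : List Int,
      bubblePass^[k] s = a ++ b ∧ b.Pairwise (· ≤ ·) ∧
      (∀ u ∈ a, ∀ y ∈ b, u ≤ y) ∧ (a ++ b).Perm s ∧ (a = [] ∨ k ≤ b.length) := by
  intro k
  induction k with
  | zero => exact ⟨s, [], by simp, by simp, by simp, by simp, Or.inr (by simp)⟩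
  | succ k ih =>
    obtain ⟨a, b, heq, hb, hdom, hperm, hlen⟩ := ih
    cases a with
    | nil =>
      refine ⟨[], b, ?_, hb, by simp, by simpa using hperm, Or.inl rfl⟩
      rw [Function.iterate_succ_apply', heq]
      simpa using bubblePass_sorted_fix b hb
    | cons x rest =>
      obtain ⟨a', m, heq2, hperm2, hle⟩ := bubblePass_step rest x b hb hdom
      refine ⟨a', m :: b, ?_, ?_, ?_, ?_, ?_⟩
      · rw [Function.iterate_succ_apply', heq]; simpa using heq2
      · refine List.pairwise_cons.mpr ⟨?_, hb⟩
        intro y hy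
        have hm : m ∈ x :: rest := hperm2.mem_iff.mp (by simp)
        exact hdom m hm y hy
      · intro u hu y hy
        have hu' : u ∈ x :: rest := hperm2.mem_iff.mp (by simp [hu])
        rcases List.mem_cons.mp hy with h | h
        · exact h ▸ hle u hu
        · exact hdom u hu' y h
      · have h1 : ((a' ++ [m]) ++ b).Perm ((x :: rest) ++ b) := hperm2.append_right b
        have h2 : (a' ++ m :: b) = (a' ++ [m]) ++ b := by simp
        exact h2 ▸ (h1.trans hperm)
      · rcases hlen with h | h
        · exact absurd h (List.cons_ne_nil x rest)
        · exact Or.inr (by simp; omega)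

theorem bubble_sorts (s : List Int) :
    (bubblePass^[s.length] s).Pairwise (· ≤ ·) ∧ (bubblePass^[s.length] s).Perm s := by
  obtain ⟨a, b, heq, hb, hdom, hperm, hlen⟩ := bubble_iterate_invariant s s.length
  have hlenab : a.length + b.length = s.length := by
    have := hperm.length_eq; simpa using this
  have ha : a = [] := by
    rcases hlen with h | h
    · exact h
    · have : a.length = 0 := by omega
      exact List.length_eq_zero_iff.mp this
  subst ha
  simp at heq
  exact ⟨heq ▸ hb, heq ▸ (by simpa using hperm)⟩

-- the set-building loop of A: nodup output whose members are the matching elements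
theorem setBuild_spec (p : Int → Bool) :
    ∀ (arr : List Int) (s0 : List Int), s0.Nodup →
      (arr.foldl (fun ds num => if p num then PySem.Set.add ds num else ds) s0).Nodup ∧
      (∀ x, x ∈ arr.foldl (fun ds num => if p num then PySem.Set.add ds num else ds) s0 ↔
        x ∈ s0 ∨ (x ∈ arr ∧ p x = true)) := by
  intro arr
  induction arr with
  | nil => intro s0 h0; simpa using h0
  | cons num t ih =>
    intro s0 h0
    by_cases hp : p num = true
    · have h1 : (PySem.Set.add s0 num).Nodup := by
        by_cases hm : num ∈ s0
        · simpa [PySem.Set.add, PySem.Set.contains, hm] using h0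
        · simpa [PySem.Set.add, PySem.Set.contains, hm, List.nodup_append] using
            ⟨h0, fun a ha (h : a = num) => hm (h ▸ ha)⟩
      obtain ⟨hn, hmem⟩ := ih (PySem.Set.add s0 num) h1
      refine ⟨by simpa [List.foldl, hp] using hn, ?_⟩
      intro x
      rw [show ((num :: t).foldl (fun ds n => if p n then PySem.Set.add ds n else ds) s0)
          = t.foldl (fun ds n => if p n then PySem.Set.add ds n else ds) (PySem.Set.add s0 num) by
        simp [List.foldl, hp]]
      rw [hmem x]
      constructor
      · rintro (h | h)
        · rcases (PySem.Set.mem_add _ _ _).mp h with h2 | h2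
          · exact Or.inl h2
          · exact Or.inr ⟨by simp [h2], h2 ▸ hp⟩
        · exact Or.inr ⟨by simp [h.1], h.2⟩
      · rintro (h | ⟨h1', h2'⟩)
        · exact Or.inl ((PySem.Set.mem_add _ _ _).mpr (Or.inl h))
        · rcases List.mem_cons.mp h1' with h | h
          · exact Or.inl ((PySem.Set.mem_add _ _ _).mpr (Or.inr h))
          · exact Or.inr ⟨h, h2'⟩
    · obtain ⟨hn, hmem⟩ := ih s0 h0
      refine ⟨by simpa [List.foldl, hp] using hn, ?_⟩
      intro x
      rw [show ((num :: t).foldl (fun ds n => if p n then PySem.Set.add ds n else ds) s0)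
          = t.foldl (fun ds n => if p n then PySem.Set.add ds n else ds) s0 by simp [List.foldl, hp]]
      rw [hmem x]
      constructor
      · rintro (h | h)
        · exact Or.inl h
        · exact Or.inr ⟨by simp [h.1], h.2⟩
      · rintro (h | ⟨h1', h2'⟩)
        · exact Or.inl h
        · rcases List.mem_cons.mp h1' with h | h
          · subst h; simp [hp] at h2'
          · exact Or.inr ⟨h, h2'⟩

-- B's adjacent-dedup loop, on a sorted remainder with accumulator r ++ [prev]
theorem dedup_loop_spec :
    ∀ (ys : List Int) (r : List Int) (prev : Int),
      (r ++ [prev]).Pairwise (· < ·) → ys.Pairwise (· ≤ ·) → (∀ y ∈ ys, prev ≤ y) →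
      ((ys.foldl (fun res num => if res = [] ∨ res.getLast? ≠ some num then res ++ [num] else res)
          (r ++ [prev])).Pairwise (· < ·) ∧
       (∀ x, x ∈ ys.foldl (fun res num => if res = [] ∨ res.getLast? ≠ some num then res ++ [num] else res)
          (r ++ [prev]) ↔ x ∈ r ++ [prev] ∨ (x ∈ ys ∧ x ≠ prev))) := by
  intro ys
  induction ys with
  | nil => intro r prev hacc _ _; exact ⟨hacc, by simp⟩
  | cons y t ih =>
    intro r prev hacc hys hdom
    have hlast : (r ++ [prev]).getLast? = some prev := by simp
    have hpy : prev ≤ y := hdom y (by simp)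
    have ht : t.Pairwise (· ≤ ·) := (List.pairwise_cons.mp hys).2
    by_cases hyp : y = prev
    · subst hyp
      obtain ⟨hn, hmem⟩ := ih r y hacc ht (fun z hz => (List.pairwise_cons.mp hys).1 z hz)
      refine ⟨by simpa [List.foldl, hlast] using hn, ?_⟩
      intro x
      rw [show ((y :: t).foldl (fun res num => if res = [] ∨ res.getLast? ≠ some num then res ++ [num] else res) (r ++ [y]))
          = t.foldl (fun res num => if res = [] ∨ res.getLast? ≠ some num then res ++ [num] else res) (r ++ [y]) by
        simp [List.foldl, hlast]]
      rw [hmem x]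
      constructor
      · rintro (h | h)
        · exact Or.inl h
        · exact Or.inr ⟨by simp [h.1], h.2⟩
      · rintro (h | ⟨h1, h2⟩)
        · exact Or.inl h
        · rcases List.mem_cons.mp h1 with h | h
          · exact absurd h h2
          · exact Or.inr ⟨h, h2⟩
    · have hlt : prev < y := lt_of_le_of_ne hpy (Ne.symm hyp)
      have hacc2 : ((r ++ [prev]) ++ [y]).Pairwise (· < ·) := by
        rw [List.pairwise_append]
        refine ⟨hacc, by simp, ?_⟩
        intro u hu v hv
        simp at hv; subst hv
        rcases List.mem_append.mp hu with h | h
        · have : u < prev := by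
            have := (List.pairwise_append.mp hacc).2.2 u h prev (by simp)
            exact this
          exact lt_trans this hlt
        · simp at h; exact h ▸ hlt
      obtain ⟨hn, hmem⟩ := ih (r ++ [prev]) y (by simpa using hacc2) ht
        (fun z hz => (List.pairwise_cons.mp hys).1 z hz)
      refine ⟨?_, ?_⟩
      · rw [show ((y :: t).foldl (fun res num => if res = [] ∨ res.getLast? ≠ some num then res ++ [num] else res) (r ++ [prev]))
            = t.foldl (fun res num => if res = [] ∨ res.getLast? ≠ some num then res ++ [num] else res) ((r ++ [prev]) ++ [y]) by
          simp [List.foldl, hlast, Ne.symm hyp]]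
        exact hn
      · intro x
        rw [show ((y :: t).foldl (fun res num => if res = [] ∨ res.getLast? ≠ some num then res ++ [num] else res) (r ++ [prev]))
            = t.foldl (fun res num => if res = [] ∨ res.getLast? ≠ some num then res ++ [num] else res) ((r ++ [prev]) ++ [y]) by
          simp [List.foldl, hlast, Ne.symm hyp]]
        rw [hmem x]
        constructor
        · rintro (h | ⟨h1, h2⟩)
          · rcases List.mem_append.mp h with h3 | h3
            · exact Or.inl h3
            · simp at h3; exact Or.inr ⟨by simp [h3], by rw [h3]; exact fun h4 => hyp h4⟩
          · have hxy : y ≤ x := (List.pairwise_cons.mp hys).1 x h1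
            exact Or.inr ⟨by simp [h1], by intro h4; rw [h4] at hxy; exact absurd hxy (not_le.mpr hlt)⟩
        · rintro (h | ⟨h1, h2⟩)
          · exact Or.inl (List.mem_append.mpr (Or.inl h))
          · rcases List.mem_cons.mp h1 with h3 | h3
            · exact Or.inl (by simp [h3])
            · by_cases hxy : x = y
              · exact Or.inl (by simp [hxy])
              · exact Or.inr ⟨h3, hxy⟩

theorem pairwise_lt_of_le_nodup {l : List Int} (h1 : l.Pairwise (· ≤ ·)) (h2 : l.Nodup) :
    l.Pairwise (· < ·) :=
  (h1.and h2).imp (fun h => lt_of_le_of_ne h.1 h.2)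

-- ===== VERDICT (by name: the statement is the Claim_ definition above) =====
theorem filter_divisible_by_3_and_7_spec : Claim_equal_filter_divisible_by_3_and_7 := by
  intro arr _
  unfold Spec_filter_divisible_by_3_and_7
  unfold filter_divisible_by_3_and_7 filter_divisible_by_3_and_7_alt
  simp only []
  set p : Int → Bool := fun num => PySem.Int.mod num 3 == 0 && PySem.Int.mod num 7 == 0 with hp
  -- A's set
  set ds := arr.foldl (fun ds num => if p num then PySem.Set.add ds num else ds) PySem.Set.empty with hds
  obtain ⟨hnodup, hmem⟩ := setBuild_spec p arr PySem.Set.empty (by simp [PySem.Set.empty])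
  rw [← hds] at hnodup hmem
  -- A's result
  have hfold : (PySem.List.pyRange 0 (ds.length : Int) 1).foldl (fun r _ => bubblePass r) ds
      = bubblePass^[ds.length] ds := by
    rw [foldl_const_eq_iterate]
    congr 1
    rw [PySem.List.length_pyRange_one]
    omega
  obtain ⟨hAsorted, hAperm⟩ := bubble_sorts ds
  set A := bubblePass^[ds.length] ds with hA
  have hAnodup : A.Nodup := hAperm.nodup_iff.mpr hnodup
  have hAlt : A.Pairwise (· < ·) := pairwise_lt_of_le_nodup hAsorted hAnodup
  have hAmem : ∀ x, x ∈ A ↔ x ∈ arr ∧ p x = true := by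
    intro x
    rw [hAperm.mem_iff, hmem x]
    simp [PySem.Set.empty]
  -- B's result
  set picked := arr.filter p with hpicked
  set spicked := PySem.List.sorted picked (fun x => x) false with hsp
  have hspick_sorted : spicked.Pairwise (· ≤ ·) := by
    simpa using PySem.List.sorted_pairwise picked (fun x => x)
  have hspick_mem : ∀ x, x ∈ spicked ↔ x ∈ arr ∧ p x = true := by
    intro x
    rw [hsp, PySem.List.mem_sorted, hpicked, List.mem_filter]
  set B := spicked.foldl (fun res num => if res = [] ∨ res.getLast? ≠ some num then res ++ [num] else res) [] with hB
  have hBprops : B.Pairwise (· < ·) ∧ ∀ x, x ∈ B ↔ x ∈ spicked := by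
    cases hsc : spicked with
    | nil => rw [hB, hsc]; exact ⟨by simp, by simp⟩
    | cons z t =>
      have hzt := hsc ▸ hspick_sorted
      obtain ⟨hn, hm⟩ := dedup_loop_spec t [] z (by simp)
        ((List.pairwise_cons.mp hzt).2) ((List.pairwise_cons.mp hzt).1)
      have hfirst : B = t.foldl (fun res num => if res = [] ∨ res.getLast? ≠ some num then res ++ [num] else res) ([] ++ [z]) := by
        rw [hB, hsc]; simp [List.foldl]
      refine ⟨hfirst ▸ hn, ?_⟩
      intro x
      rw [hfirst, hm x]
      constructor
      · rintro (h | h)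
        · simp at h; simp [h]
        · simp [h.1]
      · intro h
        rcases List.mem_cons.mp h with h2 | h2
        · exact Or.inl (by simp [h2])
        · by_cases hxz : x = z
          · exact Or.inl (by simp [hxz])
          · exact Or.inr ⟨h2, hxz⟩
  obtain ⟨hBlt, hBmem⟩ := hBprops
  -- both strictly increasing and permutations of each other: equal
  have hperm : A.Perm B := by
    rw [List.perm_ext_iff_of_nodup hAnodup (hBlt.imp (fun h => ne_of_lt h))]
    intro x
    rw [hAmem x, hBmem x, hspick_mem x]
  have h1 : PySem.List.sorted B (fun x => x) false = A := by
    apply PySem.List.sorted_eq_of_perm_of_pairwise_lt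
    · exact hperm
    · simpa using hAlt
  have h2 : PySem.List.sorted B (fun x => x) false = B := by
    apply PySem.List.sorted_eq_self_of_pairwise
    simpa using hBlt.imp (fun h => le_of_lt h)
  rw [hfold, ← h1]
  exact h2
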